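-- pv_equiv track=rewrite | github.com/UniHD-CEG/CUDAsap | conditionAnalyzer/cfg.py | construct_loop
-- ===== SOURCE A (Python) =====
-- def construct_loop(path: list, current_node: int):
--     res = []
--     for node in reversed(path):
--         res.append(node)
--         if node == current_node:
--             break
--     res.reverse()
--     return res
-- ===== SOURCE B (Python) =====
-- def construct_loop(path: list, current_node: int):
--     idx = 0
--     for i, node in enumerate(path):
--         if node == current_node:
--             idx = i
--     return path[idx:]
-- ===== Notes on version B (the rewrite author's own statement) =====
-- stated objective: simpler
-- what changed: Instead of reverse-iterating with append/break and a final in-place reverse, B finds the last index of the node in one forward enumerate scan (default 0 when absent) and returns the slice path[idx:].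
import Mathlib
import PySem

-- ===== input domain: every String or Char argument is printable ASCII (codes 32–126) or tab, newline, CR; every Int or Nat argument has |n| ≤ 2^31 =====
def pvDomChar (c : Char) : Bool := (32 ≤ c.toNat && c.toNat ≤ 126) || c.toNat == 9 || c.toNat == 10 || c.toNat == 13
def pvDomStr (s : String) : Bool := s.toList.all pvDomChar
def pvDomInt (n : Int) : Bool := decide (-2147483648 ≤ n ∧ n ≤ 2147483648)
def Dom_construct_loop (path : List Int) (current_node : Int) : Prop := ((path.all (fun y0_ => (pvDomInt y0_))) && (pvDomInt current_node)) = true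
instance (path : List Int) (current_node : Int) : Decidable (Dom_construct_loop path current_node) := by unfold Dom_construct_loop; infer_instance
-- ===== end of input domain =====

-- B replaces A's reverse-iterate-append-break-then-reverse loop with a forward
-- scan for the last index of the node followed by a slice (simpler decomposition).

-- ===== PORT A =====
-- loop 'for node in reversed(path): res.append(node); if node == current_node: break'
def aLoop (c : Int) : List Int → List Int → List Int
  | [], res => res
  | n :: rest, res =>
      let res' := res ++ [n]
      if n = c then res' else aLoop c rest res'

def construct_loop (path : List Int) (current_node : Int) : List Int :=
  (aLoop current_node path.reverse []).reverse

-- ===== PORT B =====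
-- 'idx = 0; for i, node in enumerate(path): if node == current_node: idx = i'
def altIdx (c : Int) : List Int → Nat → Nat → Nat
  | [], _, idx => idx
  | n :: rest, i, idx => altIdx c rest (i + 1) (if n = c then i else idx)

-- 'return path[idx:]' with idx ≥ 0: slice from a nonnegative index = drop
def construct_loop_alt (path : List Int) (current_node : Int) : List Int :=
  path.drop (altIdx current_node path 0 0)

-- ===== PRECONDITION & SPEC =====
def Spec_construct_loop (path : List Int) (current_node : Int) (out : List Int) : Prop := out = construct_loop_alt path current_node
instance (path : List Int) (current_node : Int) (out : List Int) : Decidable (Spec_construct_loop path current_node out) := by unfold Spec_construct_loop; infer_instance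

-- ===== CLAIM (what is proved, stated in full; the proofs are below) =====
def Claim_equal_construct_loop : Prop := ∀ (path : List Int) (current_node : Int), Dom_construct_loop path current_node → Spec_construct_loop path current_node (construct_loop path current_node)

-- ===== LEMMAS AND PROOFS =====

-- pure form of A's loop body
def tu (c : Int) : List Int → List Int
  | [] => []
  | n :: rest => n :: (if n = c then [] else tu c rest)

theorem aLoop_eq_tu (c : Int) (l res : List Int) : aLoop c l res = res ++ tu c l := by
  induction l generalizing res with
  | nil => simp [aLoop, tu]
  | cons n rest ih =>
      simp only [aLoop, tu]
      split_ifs with h <;> simp [ih]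

theorem altIdx_le (c : Int) (l : List Int) (i d : Nat) (h : d ≤ i + l.length) :
    altIdx c l i d ≤ i + l.length := by
  induction l generalizing i d with
  | nil => simpa [altIdx] using h
  | cons n rest ih =>
      simp only [altIdx, List.length_cons]
      exact (ih (i + 1) (if n = c then i else d) (by simp only [List.length_cons] at h; split_ifs <;> omega)).trans (by omega)

theorem altIdx_append (c x : Int) (l : List Int) (i d : Nat) :
    altIdx c (l ++ [x]) i d = if x = c then i + l.length else altIdx c l i d := by
  induction l generalizing i d with
  | nil => simp [altIdx]
  | cons n rest ih =>
      simp only [List.cons_append, altIdx, List.length_cons, ih]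
      split_ifs <;> omega

theorem construct_loop_eq (path : List Int) (c : Int) :
    construct_loop path c = construct_loop_alt path c := by
  induction path using List.reverseRecOn with
  | nil => rfl
  | append_singleton xs x ih =>
      simp only [construct_loop, construct_loop_alt, aLoop_eq_tu, List.nil_append] at *
      rw [List.reverse_append, List.reverse_singleton, List.singleton_append]
      simp only [tu, altIdx_append]
      by_cases h : x = c
      · simp [h, List.drop_append_of_le_length (Nat.le_refl xs.length), List.drop_length]
      · have hle : altIdx c xs 0 0 ≤ xs.length := by
          simpa using altIdx_le c xs 0 0 (by simp)
        simp [h, List.drop_append_of_le_length hle, ← ih]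

-- ===== VERDICT (by name: the statement is the Claim_ definition above) =====
theorem construct_loop_spec : Claim_equal_construct_loop := by
  intro path c _
  exact construct_loop_eq path c
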